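-- pv_equiv track=rewrite | github.com/ashgraey/ash_Algorithm | ash_programmers/프로그래머스_레벨2/LV2_04_유형_문자열파싱/퀴즈/_0403_뉴스클러스터링_문제.py | get_wordArr
-- ===== SOURCE A (Python) =====
-- def get_wordArr(word) :
--     wordArr = []
--     sample = "ABCDEFGHIJKLMNOPQRSTUVWXYZabcdefghijklmnopqrstuvwxyz"
--     for i in range(len(word) - 1) :
--         temp = ""
--         cnt = 0
--         if word[i] in sample :
--             temp += word[i]
--             cnt += 1
--         if word[i + 1] in sample :
--             temp += word[i + 1]
--             cnt += 1
--
--         if cnt == 2 :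
--             wordArr.append(temp)
--
--     return wordArr
-- ===== SOURCE B (Python) =====
-- def get_wordArr(word):
--     letters = set("ABCDEFGHIJKLMNOPQRSTUVWXYZabcdefghijklmnopqrstuvwxyz")
--     out = []
--     i = 0
--     n = len(word)
--     while i < n:
--         if word[i] not in letters:
--             i += 1
--             continue
--         j = i
--         while j < n and word[j] in letters:
--             j += 1
--         run = word[i:j]
--         out.extend(a + b for a, b in zip(run, run[1:]))
--         i = j
--     return out
-- ===== Notes on version B (the rewrite author's own statement) =====
-- stated objective: alternative
-- what changed: A tests both characters of every adjacent index pair per loop step; B first cuts the word into maximal runs of ASCII letters with a skip/scan while-loop and then emits the bigrams inside each run via zip(run, run[1:]).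
import Mathlib
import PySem

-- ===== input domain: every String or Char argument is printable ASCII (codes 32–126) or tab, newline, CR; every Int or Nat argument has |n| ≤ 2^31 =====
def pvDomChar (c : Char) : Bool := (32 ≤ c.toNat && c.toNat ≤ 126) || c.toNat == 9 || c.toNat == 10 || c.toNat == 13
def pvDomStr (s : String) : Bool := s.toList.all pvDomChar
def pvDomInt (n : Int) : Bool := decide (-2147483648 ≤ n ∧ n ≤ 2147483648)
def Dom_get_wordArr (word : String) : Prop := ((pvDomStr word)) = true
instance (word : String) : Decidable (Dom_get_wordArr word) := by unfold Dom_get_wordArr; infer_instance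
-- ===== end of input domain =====

-- B re-implements A by scanning maximal letter runs and emitting in-run bigrams (different decomposition, same values; no speed claim).

-- ===== PORT A =====
-- the 52-letter sample string; `word[i] in sample` on a single char is char membership
def pvSampleA : List Char := "ABCDEFGHIJKLMNOPQRSTUVWXYZabcdefghijklmnopqrstuvwxyz".toList

-- A's loop over i in range(len(word)-1): each step looks at word[i], word[i+1],
-- builds temp/cnt exactly as A does; recursion on (word[i] :: word[i+1] :: rest).
def pvALoop : List Char → List String
  | c1 :: c2 :: rest =>
      let temp : String := ""
      let cnt : Nat := 0
      let (temp, cnt) := if pvSampleA.contains c1 then (temp.push c1, cnt + 1) else (temp, cnt)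
      let (temp, cnt) := if pvSampleA.contains c2 then (temp.push c2, cnt + 1) else (temp, cnt)
      (if cnt == 2 then [temp] else []) ++ pvALoop (c2 :: rest)
  | _ => []

def get_wordArr (word : String) : List String := pvALoop word.toList

-- ===== PORT B =====
def pvLettersB : List Char := "ABCDEFGHIJKLMNOPQRSTUVWXYZabcdefghijklmnopqrstuvwxyz".toList

-- bigrams of a run, as Source B's zip(run, run[1:])
def pvBigrams (run : List Char) : List String :=
  (run.zip run.tail).map (fun p => String.ofList [p.1, p.2])

-- outer while loop: skip a non-letter, or cut the maximal letter run starting here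
-- (the inner while = takeWhile/dropWhile) and emit its bigrams
def pvBRuns : List Char → List String
  | [] => []
  | c :: rest =>
      if pvLettersB.contains c then
        pvBigrams (c :: rest.takeWhile pvLettersB.contains) ++
          pvBRuns (rest.dropWhile pvLettersB.contains)
      else
        pvBRuns rest
termination_by cs => cs.length
decreasing_by
  · exact Nat.lt_succ_of_le (List.length_dropWhile_le _ _)
  · simp

def get_wordArr_alt (word : String) : List String := pvBRuns word.toList

-- ===== PRECONDITION & SPEC =====
def Spec_get_wordArr (word : String) (out : List String) : Prop := out = get_wordArr_alt word
instance (word : String) (out : List String) : Decidable (Spec_get_wordArr word out) := by unfold Spec_get_wordArr; infer_instance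

-- ===== CLAIM (what is proved, stated in full; the proofs are below) =====
def Claim_equal_get_wordArr : Prop := ∀ (word : String), Dom_get_wordArr word → Spec_get_wordArr word (get_wordArr word)

-- ===== LEMMAS AND PROOFS =====

theorem pv_push_push (c d : Char) : ("".push c |>.push d) = String.ofList [c, d] := by
  apply String.toList_inj.mp
  simp

theorem pvALoop_cons_cons (c1 c2 : Char) (rest : List Char) :
    pvALoop (c1 :: c2 :: rest) =
      (if c1 ∈ pvSampleA ∧ c2 ∈ pvSampleA
        then [String.ofList [c1, c2]] else []) ++ pvALoop (c2 :: rest) := by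
  by_cases h1 : c1 ∈ pvSampleA <;> by_cases h2 : c2 ∈ pvSampleA <;>
    simp [pvALoop, h1, h2, pv_push_push]

theorem pvBigrams_cons_cons (c1 c2 : Char) (t : List Char) :
    pvBigrams (c1 :: c2 :: t) = String.ofList [c1, c2] :: pvBigrams (c2 :: t) := by
  simp [pvBigrams]

theorem pvSample_eq : pvSampleA = pvLettersB := rfl

theorem pvBRuns_cons_pos (c : Char) (rest : List Char) (h : c ∈ pvLettersB) :
    pvBRuns (c :: rest) =
      pvBigrams (c :: rest.takeWhile pvLettersB.contains) ++
        pvBRuns (rest.dropWhile pvLettersB.contains) := by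
  rw [pvBRuns]; simp [h]

theorem pvBRuns_cons_neg (c : Char) (rest : List Char) (h : c ∉ pvLettersB) :
    pvBRuns (c :: rest) = pvBRuns rest := by
  rw [pvBRuns]; simp [h]

theorem pv_key : ∀ cs : List Char, pvALoop cs = pvBRuns cs := by
  intro cs
  induction cs with
  | nil => simp [pvALoop, pvBRuns]
  | cons c1 tail ih =>
    cases tail with
    | nil =>
      by_cases h1 : c1 ∈ pvLettersB
      · rw [pvBRuns_cons_pos c1 [] h1]
        simp [pvALoop, pvBRuns, pvBigrams]
      · rw [pvBRuns_cons_neg c1 [] h1]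
        simp [pvALoop, pvBRuns]
    | cons c2 r =>
      rw [pvALoop_cons_cons, pvSample_eq]
      by_cases h1 : c1 ∈ pvLettersB
      · rw [pvBRuns_cons_pos c1 (c2 :: r) h1]
        by_cases h2 : c2 ∈ pvLettersB
        · have h2' : pvLettersB.contains c2 = true := by simpa using h2
          rw [List.takeWhile_cons_of_pos h2', List.dropWhile_cons_of_pos h2',
              pvBigrams_cons_cons]
          rw [ih, pvBRuns_cons_pos c2 r h2]
          simp [h1, h2]
        · have h2' : ¬ pvLettersB.contains c2 = true := by simpa using h2
          rw [List.takeWhile_cons_of_neg h2', List.dropWhile_cons_of_neg h2']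
          rw [ih, pvBRuns_cons_neg c2 r h2]
          simp [pvBigrams, h2]
      · rw [pvBRuns_cons_neg c1 (c2 :: r) h1, ih]
        simp [h1]

-- ===== VERDICT (by name: the statement is the Claim_ definition above) =====
theorem get_wordArr_spec : Claim_equal_get_wordArr := by
  intro word _
  unfold Spec_get_wordArr get_wordArr get_wordArr_alt
  exact pv_key _
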